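-- pv_equiv track=rewrite | github.com/hullcjustin/data-sort | sort_doc.py | words_after_target
-- ===== SOURCE A (Python) =====
-- def words_after_target(item):
--     count = 0
--     target_flag = False
--     for item_string in item:
--         if target_flag:
--             count += 1
--         if item_string == 'T':
--             target_flag = True
--     return count
-- ===== SOURCE B (Python) =====
-- def words_after_target(item):
--     if 'T' in item:
--         return len(item) - item.index('T') - 1
--     return 0
-- ===== Notes on version B (the rewrite author's own statement) =====
-- stated objective: simpler
-- what changed: Replaces the flag-driven counting loop with a closed-form computation: len(item) - item.index('T') - 1 when 'T' is present, else 0.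
import Mathlib
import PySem

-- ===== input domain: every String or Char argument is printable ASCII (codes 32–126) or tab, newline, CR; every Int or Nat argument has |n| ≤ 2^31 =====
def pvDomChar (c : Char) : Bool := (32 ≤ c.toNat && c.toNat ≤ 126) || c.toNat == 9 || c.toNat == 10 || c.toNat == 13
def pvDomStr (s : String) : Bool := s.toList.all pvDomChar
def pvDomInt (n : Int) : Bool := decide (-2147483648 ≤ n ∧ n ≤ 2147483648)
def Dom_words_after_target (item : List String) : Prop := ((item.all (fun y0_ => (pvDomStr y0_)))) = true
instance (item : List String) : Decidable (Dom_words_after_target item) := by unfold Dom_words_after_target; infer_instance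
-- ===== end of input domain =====

-- B replaces A's flag-driven counting loop by a closed form from the first index of "T" (objective: simpler).


-- ===== PORT A =====
-- loop state: (count, target_flag)
def words_after_target (item : List String) : Int :=
  (item.foldl (fun (st : Int × Bool) item_string =>
    let st := if st.2 then (st.1 + 1, st.2) else st
    if item_string == "T" then (st.1, true) else st) (0, false)).1

-- ===== PORT B =====
def words_after_target_alt (item : List String) : Int :=
  match PySem.List.index? item "T" with
  | some i => (item.length : Int) - (i : Int) - 1
  | none => 0

-- ===== PRECONDITION & SPEC =====
def Spec_words_after_target (item : List String) (out : Int) : Prop := out = words_after_target_alt item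
instance (item : List String) (out : Int) : Decidable (Spec_words_after_target item out) := by unfold Spec_words_after_target; infer_instance

-- ===== CLAIM (what is proved, stated in full; the proofs are below) =====
def Claim_equal_words_after_target : Prop := ∀ (item : List String), Dom_words_after_target item → Spec_words_after_target item (words_after_target item)

-- ===== LEMMAS AND PROOFS =====


-- once the flag is set, the fold adds 1 per remaining element
lemma wat_foldl_flag_true (item : List String) (c : Int) :
    (item.foldl (fun (st : Int × Bool) item_string =>
      let st := if st.2 then (st.1 + 1, st.2) else st
      if item_string == "T" then (st.1, true) else st) (c, true)) = (c + item.length, true) := by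
  induction item generalizing c with
  | nil => simp
  | cons x xs ih =>
    rw [List.foldl_cons]
    have hstep : (let st := if (c, true).2 then ((c, true).1 + 1, (c, true).2) else (c, true);
        if x == "T" then (st.1, true) else st) = ((c + 1 : Int), true) := by
      by_cases hx : x == "T" <;> simp [hx]
    rw [hstep, ih]
    congr 1
    simp only [List.length_cons]
    push_cast; ring

lemma wat_eq_alt (item : List String) : words_after_target item = words_after_target_alt item := by
  induction item with
  | nil => rfl
  | cons x xs ih =>
    by_cases hx : x = "T"
    · subst hx
      unfold words_after_target words_after_target_alt
      rw [List.foldl_cons, PySem.List.index?_cons_self]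
      have h0 : (let st := if ((0 : Int), false).2 then (((0 : Int), false).1 + 1, ((0 : Int), false).2) else ((0 : Int), false);
          if ("T" : String) == "T" then (st.1, true) else st) = ((0 : Int), true) := by simp
      rw [h0, wat_foldl_flag_true]
      simp
    · unfold words_after_target words_after_target_alt at *
      rw [List.foldl_cons, PySem.List.index?_cons_of_ne xs hx]
      have h0 : (let st := if ((0 : Int), false).2 then (((0 : Int), false).1 + 1, ((0 : Int), false).2) else ((0 : Int), false);
          if x == "T" then (st.1, true) else st) = ((0 : Int), false) := by
        simp [hx]
      rw [h0]
      cases h : PySem.List.index? xs "T" with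
      | none => rw [h] at ih; simpa using ih
      | some i =>
        rw [h] at ih
        simp only [Option.map_some] at *
        simp only [List.length_cons] at *
        push_cast at ih ⊢
        omega

-- ===== VERDICT (by name: the statement is the Claim_ definition above) =====
theorem words_after_target_spec : Claim_equal_words_after_target := by
  intro item _
  exact wat_eq_alt item
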